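-- pv_equiv track=rewrite | github.com/aldewereld/AventOfCode | 2019/day04/day4.py | has_double
-- ===== SOURCE A (Python) =====
-- from typing import List
--
-- def has_double(input: List[int]) -> bool:
--     if len(input) == 1:
--         return False
--     else:
--         head1, head2, *tail = input
--         if head1 == head2:
--             return True
--         else:
--             return has_double([head2]+tail)
-- ===== SOURCE B (Python) =====
-- from typing import List
--
-- def has_double(input: List[int]) -> bool:
--     return any(a == b for a, b in zip(input, input[1:]))
-- ===== Notes on version B (the rewrite author's own statement) =====
-- stated objective: faster
-- what changed: Replaced A's recursion that rebuilds a new list [head2]+tail at every step with one linear zip-adjacent pass using any().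
import Mathlib
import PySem

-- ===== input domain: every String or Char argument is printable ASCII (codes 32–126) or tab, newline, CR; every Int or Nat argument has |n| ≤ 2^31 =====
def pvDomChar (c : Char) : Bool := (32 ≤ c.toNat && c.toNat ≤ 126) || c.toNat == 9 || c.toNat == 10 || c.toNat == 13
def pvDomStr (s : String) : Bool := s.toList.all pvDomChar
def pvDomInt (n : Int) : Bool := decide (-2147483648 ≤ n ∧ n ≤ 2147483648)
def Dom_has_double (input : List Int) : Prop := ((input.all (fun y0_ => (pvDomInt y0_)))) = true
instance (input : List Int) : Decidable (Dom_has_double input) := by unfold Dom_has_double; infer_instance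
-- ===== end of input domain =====

-- B replaces A's quadratic recursion (rebuilding [head2]+tail each step) with one linear
-- zip-adjacent any() pass; return value only, no side effects.

-- ===== PORT A =====
-- literal transliteration of A's recursion; [] is unreachable under Pre_ (Python raises ValueError there)
def has_double : List Int → Bool
  | [] => false
  | [_] => false
  | head1 :: head2 :: tail =>
      if head1 == head2 then true else has_double (head2 :: tail)

-- ===== PORT B =====
def has_double_alt (input : List Int) : Bool :=
  (input.zip (PySem.List.slice input (some 1) none)).any (fun p => p.1 == p.2)

-- ===== PRECONDITION & SPEC =====
-- Pre_ excludes only the empty list, on which A's tuple unpacking raises ValueError.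
def Pre_has_double (input : List Int) : Prop := input ≠ []
instance (input : List Int) : Decidable (Pre_has_double input) := by unfold Pre_has_double; infer_instance
def pvWitness_has_double : List Int := ([1, 2, 2])

def Spec_has_double (input : List Int) (out : Bool) : Prop := out = has_double_alt input
instance (input : List Int) (out : Bool) : Decidable (Spec_has_double input out) := by unfold Spec_has_double; infer_instance

-- ===== CLAIM (what is proved, stated in full; the proofs are below) =====
def Claim_equal_has_double : Prop := ∀ (input : List Int), Dom_has_double input → Pre_has_double input → Spec_has_double input (has_double input)

-- ===== LEMMAS AND PROOFS =====
lemma alt_eq (input : List Int) :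
    has_double_alt input = (input.zip input.tail).any (fun p => p.1 == p.2) := by
  simp [has_double_alt, PySem.List.slice_from_one]

lemma eq_on_all (input : List Int) : has_double input = has_double_alt input := by
  induction input with
  | nil => simp [has_double, alt_eq]
  | cons x xs ih =>
      cases xs with
      | nil => simp [has_double, alt_eq]
      | cons y ys =>
          rw [alt_eq] at ih ⊢
          by_cases h : x = y <;> simp [has_double, h, ih]

-- ===== VERDICT (by name: the statement is the Claim_ definition above) =====
theorem has_double_spec : Claim_equal_has_double := by
  intro input _ _
  unfold Spec_has_double
  exact eq_on_all input
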